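-- pv_equiv track=rewrite | github.com/josh-flatt/CS301 | A1code_to_discuss_s23.py | word_assemble
-- ===== SOURCE A (Python) =====
-- def word_assemble(tiles, test_word):
--     """Accepts a list and a string, one containing the set of tiles and the
--     other the word to spell. Recursively calls itself, removing a tile from
--     the list and its letter from the word every recursion. Stops and returns
--     true when the base case of an empty string is reached, or is returned false.
--     """
--     if test_word == "":
--         return True
--     elif test_word[0].lower() in tiles: # If there is a tile that matches the first letter of the word.
--         tiles.remove(test_word[0].lower())         # Tile in word is removed from tileset.
--         return word_assemble(tiles, test_word[1:]) # New tileset and shorter word is recursively called.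
--     else:
--         return False
-- ===== SOURCE B (Python) =====
-- def word_assemble(tiles, test_word):
--     """Iterative version: walk the word's characters, consuming one matching
--     tile (in place, first occurrence) per character; fail fast when a
--     character has no tile left."""
--     for ch in test_word:
--         c = ch.lower()
--         if c not in tiles:
--             return False
--         tiles.remove(c)
--     return True
-- ===== Notes on version B (the rewrite author's own statement) =====
-- stated objective: simpler
-- what changed: Replaced the tail recursion that rebuilds a shorter word string each call with a single iterative loop over the word's characters, removing tiles in place as it goes and returning False at the first unmatched character.
import Mathlib
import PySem

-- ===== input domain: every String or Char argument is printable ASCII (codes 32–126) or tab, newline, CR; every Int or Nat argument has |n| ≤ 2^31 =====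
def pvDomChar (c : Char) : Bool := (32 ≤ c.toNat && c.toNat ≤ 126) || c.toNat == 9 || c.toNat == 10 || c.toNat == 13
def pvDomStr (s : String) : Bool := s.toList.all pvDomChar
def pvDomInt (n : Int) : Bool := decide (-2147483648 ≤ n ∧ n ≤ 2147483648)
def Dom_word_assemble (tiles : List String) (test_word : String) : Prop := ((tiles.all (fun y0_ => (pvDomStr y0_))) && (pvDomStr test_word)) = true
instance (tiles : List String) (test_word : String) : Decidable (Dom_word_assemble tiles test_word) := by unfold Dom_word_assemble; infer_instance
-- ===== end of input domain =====

-- B replaces A's tail recursion (which rebuilds the word by slicing each call) with one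
-- iterative loop over the characters, failing fast; objective: simpler. Both mutate
-- `tiles` identically in Python; the theorems here are about the return value.

-- ===== PORT A =====
-- A's recursion: base case empty word; else test first letter (lowered) against tiles,
-- remove that tile (membership already checked, so Python's .remove = erase) and recurse
-- on the rest of the word.
def word_assemble_A_rec (tiles : List String) (word : List Char) : Bool :=
  match word with
  | [] => true
  | c :: rest =>
    let t := String.mk [PySem.Chars.lowerChar c]
    if t ∈ tiles then word_assemble_A_rec (tiles.erase t) rest
    else false

def word_assemble (tiles : List String) (test_word : String) : Bool :=
  word_assemble_A_rec tiles test_word.toList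

-- ===== PORT B =====
-- B's loop: fold over the characters; state = some remaining tiles, or none once the
-- loop has returned False.
def word_assemble_alt_step (st : Option (List String)) (ch : Char) : Option (List String) :=
  match st with
  | none => none
  | some ts =>
    let c := String.mk [PySem.Chars.lowerChar ch]
    if c ∈ ts then some (ts.erase c) else none

def word_assemble_alt (tiles : List String) (test_word : String) : Bool :=
  (test_word.toList.foldl word_assemble_alt_step (some tiles)).isSome

-- ===== PRECONDITION & SPEC =====
def Spec_word_assemble (tiles : List String) (test_word : String) (out : Bool) : Prop := out = word_assemble_alt tiles test_word
instance (tiles : List String) (test_word : String) (out : Bool) : Decidable (Spec_word_assemble tiles test_word out) := by unfold Spec_word_assemble; infer_instance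

-- ===== CLAIM (what is proved, stated in full; the proofs are below) =====
def Claim_equal_word_assemble : Prop := ∀ (tiles : List String) (test_word : String), Dom_word_assemble tiles test_word → Spec_word_assemble tiles test_word (word_assemble tiles test_word)

-- ===== LEMMAS AND PROOFS =====
theorem foldl_step_none (l : List Char) : l.foldl word_assemble_alt_step none = none := by
  induction l with
  | nil => rfl
  | cons c rest ih => simpa [word_assemble_alt_step] using ih

theorem rec_eq_fold (l : List Char) (tiles : List String) :
    word_assemble_A_rec tiles l = (l.foldl word_assemble_alt_step (some tiles)).isSome := by
  induction l generalizing tiles with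
  | nil => rfl
  | cons c rest ih =>
    by_cases h : String.mk [PySem.Chars.lowerChar c] ∈ tiles
    · simp [word_assemble_A_rec, word_assemble_alt_step, h, ih]
    · simp [word_assemble_A_rec, word_assemble_alt_step, h, foldl_step_none]

-- ===== VERDICT (by name: the statement is the Claim_ definition above) =====
theorem word_assemble_spec : Claim_equal_word_assemble := by
  intro tiles test_word _
  unfold Spec_word_assemble word_assemble word_assemble_alt
  exact rec_eq_fold _ _
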